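-- pv_equiv track=rewrite | github.com/abatabyal/algo-ds-Python | puzzle/no_pairs_allowed.py | noAdjacentDup
-- ===== SOURCE A (Python) =====
-- def noAdjacentDup(x):
--     s = list(x)
--     count = 0
--     n = len(s)
--     for i in range(1, n):
--         # If any two adjacent characters are equal
--         if (s[i] == s[i - 1]):
--             s[i] = "a"  # Initialize it to 'a'
--             # Traverse the loop until it is different
--             # from the left and right letter.
--             while (s[i] == s[i - 1] or (i + 1 < n and s[i] == s[i + 1])):
--                 s[i] = chr(ord(s[i]) + 1)
--             i += 1
--             count += 1
--     return count
-- ===== SOURCE B (Python) =====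
-- def noAdjacentDup(x):
--     # Run-length count: each maximal run of L equal adjacent chars needs L//2 replacements.
--     count = 0
--     run = 1
--     prev = None
--     for ch in x:
--         if prev is not None and ch == prev:
--             run += 1
--         else:
--             count += run // 2
--             run = 1
--         prev = ch
--     return count + run // 2
-- ===== Notes on version B (the rewrite author's own statement) =====
-- stated objective: simpler
-- what changed: Replaces the greedy buffer-mutation simulation (with an inner while loop searching for a replacement letter) by a single run-length scan summing len(run)//2 over maximal runs of equal characters.
import Mathlib
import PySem

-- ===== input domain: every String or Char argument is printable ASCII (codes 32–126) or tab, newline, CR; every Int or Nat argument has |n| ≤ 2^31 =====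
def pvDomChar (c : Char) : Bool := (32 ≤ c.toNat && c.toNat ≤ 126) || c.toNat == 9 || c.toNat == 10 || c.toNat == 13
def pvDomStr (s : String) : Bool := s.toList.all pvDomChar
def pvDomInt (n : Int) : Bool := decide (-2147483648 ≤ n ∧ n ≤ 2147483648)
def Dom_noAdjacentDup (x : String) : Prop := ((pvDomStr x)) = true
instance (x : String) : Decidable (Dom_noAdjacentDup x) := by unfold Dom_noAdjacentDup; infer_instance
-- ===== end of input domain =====

-- B changes the algorithm: a single run-length scan summing run//2 per maximal run,
-- instead of A's greedy simulation that mutates a buffer and searches for a replacement letter.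

-- ===== PORT A =====
-- the inner `while` of A: keep incrementing the character while it equals the left
-- neighbour l or the (optional) right neighbour r.  Fuel 3 is a totality guard only:
-- starting from 'a', at most two increments are ever needed (see bumpA_ne_right below),
-- so the fuel never runs out and the recursion is exactly A's while loop.
def bumpA (c l : Char) (r : Option Char) : Nat → Char
  | 0 => c
  | fuel + 1 =>
    if c == l || r.any (· == c) then bumpA (Char.ofNat (c.toNat + 1)) l r fuel else c

-- A's for-loop over i in range(1, n): `prev` is s[i-1] after any mutation, `rest` the
-- untouched suffix s[i:], `count` the accumulator.  When s[i] == s[i-1] the slot is set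
-- to 'a' and bumped past both neighbours, exactly as in A.
def loopA (prev : Char) (rest : List Char) (count : Int) : Int :=
  match rest with
  | [] => count
  | c :: rs =>
    if c == prev then loopA (bumpA (Char.ofNat 97) prev rs.head? 3) rs (count + 1)
    else loopA c rs count

def noAdjacentDup (x : String) : Int :=
  match x.toList with
  | [] => 0
  | c :: rs => loopA c rs 0

-- ===== PORT B =====
-- B's single pass: `prev` is the previous character (none before the first), `run` the
-- length of the current run of equal characters, `count` the finished runs' total.
def loopB (prev : Option Char) (run count : Int) (rest : List Char) : Int :=
  match rest with
  | [] => count + PySem.Int.floordiv run 2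
  | c :: rs =>
    if prev.any (· == c) then loopB (some c) (run + 1) count rs
    else loopB (some c) 1 (count + PySem.Int.floordiv run 2) rs

def noAdjacentDup_alt (x : String) : Int :=
  loopB none 1 0 x.toList

-- ===== PRECONDITION & SPEC =====
def Spec_noAdjacentDup (x : String) (out : Int) : Prop := out = noAdjacentDup_alt x
instance (x : String) (out : Int) : Decidable (Spec_noAdjacentDup x out) := by unfold Spec_noAdjacentDup; infer_instance

-- ===== CLAIM (what is proved, stated in full; the proofs are below) =====
def Claim_equal_noAdjacentDup : Prop := ∀ (x : String), Dom_noAdjacentDup x → Spec_noAdjacentDup x (noAdjacentDup x)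

-- ===== LEMMAS AND PROOFS =====

-- The replacement A picks never equals the next (right) character.
theorem bumpA_ne_right (l c : Char) : bumpA (Char.ofNat 97) l (some c) 3 ≠ c := by
  simp only [bumpA, show (Char.ofNat 97) = 'a' from by decide,
    show Char.ofNat ('a'.toNat + 1) = 'b' from by decide,
    show Char.ofNat ('b'.toNat + 1) = 'c' from by decide]
  split_ifs with h1 h2 h3
  · exfalso
    simp only [Option.any_some, Bool.or_eq_true, beq_iff_eq] at h1 h2 h3
    rcases h1 with h1 | h1 <;> rcases h2 with h2 | h2 <;> rcases h3 with h3 | h3 <;>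
      subst_vars <;> simp_all
  · simp only [Option.any_some, Bool.or_eq_true, beq_iff_eq, not_or] at h3
    exact fun h => h3.2 h.symm
  · simp only [Option.any_some, Bool.or_eq_true, beq_iff_eq, not_or] at h2
    exact fun h => h2.2 h.symm
  · simp only [Option.any_some, Bool.or_eq_true, beq_iff_eq, not_or] at h1
    exact fun h => h1.2 h.symm

theorem fdiv_two (a : Int) : PySem.Int.floordiv a 2 = a / 2 :=
  PySem.Int.floordiv_eq_ediv_of_pos (by omega)

theorem loopA_add (rest : List Char) (prev : Char) (count : Int) :
    loopA prev rest count = count + loopA prev rest 0 := by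
  induction rest generalizing prev count with
  | nil => simp [loopA]
  | cons c rs ih =>
    simp only [loopA]
    split_ifs with h
    · rw [ih _ (count + 1), ih _ (0 + 1)]; ring
    · rw [ih c count]

theorem loopB_add (rest : List Char) (prev : Option Char) (run count : Int) :
    loopB prev run count rest = count + loopB prev run 0 rest := by
  induction rest generalizing prev run count with
  | nil => simp [loopB]
  | cons c rs ih =>
    simp only [loopB]
    split_ifs with h
    · rw [ih _ _ count, ih _ _ 0]
    · rw [ih _ _ (count + _), ih _ _ (0 + _)]; ring

theorem loopB_run_shift (rest : List Char) (p : Char) (run : Int) (h : 0 ≤ run) :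
    loopB (some p) (run + 2) 0 rest = 1 + loopB (some p) run 0 rest := by
  induction rest generalizing p run with
  | nil =>
    simp only [loopB, fdiv_two]
    omega
  | cons c rs ih =>
    simp only [loopB]
    split_ifs with hc
    · rw [show run + 2 + 1 = run + 1 + 2 by ring, ih c (run + 1) (by omega)]
    · rw [loopB_add rs _ _ (0 + _), loopB_add rs _ _ (0 + _), fdiv_two, fdiv_two]
      omega

-- Main invariant: A's loop from an unreplaced previous character p equals B's loop
-- with a fresh run of length 1 ending at p.
theorem loopA_eq_loopB (n : Nat) (rest : List Char) (p : Char) (hn : rest.length ≤ n) :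
    loopA p rest 0 = loopB (some p) 1 0 rest := by
  induction n generalizing rest p with
  | zero =>
    have : rest = [] := List.eq_nil_of_length_eq_zero (Nat.le_zero.mp hn)
    subst this
    simp [loopA, loopB, PySem.Int.floordiv]
  | succ n ih =>
    match rest with
    | [] => simp [loopA, loopB, PySem.Int.floordiv]
    | c :: rs =>
      simp only [loopA, loopB]
      by_cases hc : c = p
      · simp only [hc, beq_self_eq_true, Option.any_some, if_pos]
        rw [loopA_add rs _ (0 + 1)]
        match rs with
        | [] => simp [loopA, loopB, PySem.Int.floordiv]
        | d :: rs' =>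
          have hne : d ≠ bumpA (Char.ofNat 97) p (some d) 3 :=
            fun h => bumpA_ne_right p d h.symm
          simp only [List.head?, loopA, loopB]
          rw [if_neg (by simpa using hne)]
          have hlen : rs'.length ≤ n := by simp at hn; omega
          rw [ih rs' d hlen]
          by_cases hd : p = d
          · simp only [hd, beq_self_eq_true, Option.any_some, if_pos]
            rw [show (1 : Int) + 1 + 1 = 1 + 2 by ring, loopB_run_shift rs' d 1 (by omega)]
            ring
          · rw [if_neg (by simpa using hd)]
            rw [loopB_add rs' _ _ (0 + _), fdiv_two]
            norm_num
      · rw [if_neg (by simpa using hc), if_neg (by simpa using fun h => hc h.symm)]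
        rw [loopB_add rs _ _ (0 + _),
            show PySem.Int.floordiv 1 2 = 0 by decide]
        have hlen : rs.length ≤ n := by simp at hn; omega
        rw [ih rs c hlen]
        ring

-- ===== VERDICT (by name: the statement is the Claim_ definition above) =====
theorem noAdjacentDup_spec : Claim_equal_noAdjacentDup := by
  intro x _
  unfold Spec_noAdjacentDup noAdjacentDup noAdjacentDup_alt
  match h : x.toList with
  | [] => simp [loopB, PySem.Int.floordiv]
  | c :: rs =>
    simp only [loopB, Option.any_none, if_neg Bool.false_ne_true,
      show PySem.Int.floordiv 1 2 = 0 by decide]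
    rw [loopA_eq_loopB rs.length rs c le_rfl]
    norm_num
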